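-- pv_equiv track=rewrite | github.com/DanielMagen/Project_Euler | Problem 387.py | get_right_truncatable_harshad_number_up_to_len
-- ===== SOURCE A (Python) =====
-- def get_right_truncatable_harshad_number_up_to_len(length):
--     current_length = 1
--     overall_harshad_numbers = []
--     harshad_numbers_of_current_length = [i for i in range(1, 10)]
--     sum_of_digits_of_current_harshad_numbers = [i for i in range(1, 10)]
--
--     overall_harshad_numbers += harshad_numbers_of_current_length
--
--     while current_length < length:
--         new_harshad_numbers = []
--         sum_of_digits_of_new_harshad_numbers = []
--
--         for i in range(len(harshad_numbers_of_current_length)):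
--             num = harshad_numbers_of_current_length[i]
--             num_digits_sum = sum_of_digits_of_current_harshad_numbers[i]
--             num_times_10 = num * 10
--             for digit in range(10):
--                 # check if adding the another digit conserves the harshadity of the number
--                 temp_num = num_times_10 + digit
--                 temp_num_digit_sum = num_digits_sum + digit
--                 if temp_num % temp_num_digit_sum == 0:
--                     new_harshad_numbers.append(temp_num)
--                     sum_of_digits_of_new_harshad_numbers.append(temp_num_digit_sum)
--
--         current_length += 1
--         harshad_numbers_of_current_length = new_harshad_numbers
--         sum_of_digits_of_current_harshad_numbers = sum_of_digits_of_new_harshad_numbers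
--
--         overall_harshad_numbers += harshad_numbers_of_current_length
--
--     return overall_harshad_numbers
-- ===== SOURCE B (Python) =====
-- def get_right_truncatable_harshad_number_up_to_len(length):
--     # Depth-first traversal of the digit-extension tree with an explicit stack,
--     # instead of A's level-by-level loop over parallel number/digit-sum lists;
--     # one final in-place sort restores ascending order.
--     result = []
--     stack = [(d, d, 1) for d in range(9, 0, -1)]
--     while stack:
--         num, digit_sum, current_length = stack.pop()
--         result.append(num)
--         if current_length < length:
--             for digit in range(10):
--                 new_num = num * 10 + digit
--                 new_sum = digit_sum + digit
--                 if new_num % new_sum == 0: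
--                     stack.append((new_num, new_sum, current_length + 1))
--     result.sort()
--     return result
-- ===== Notes on version B (the rewrite author's own statement) =====
-- stated objective: alternative
-- what changed: Replaced A's iterative level-by-level (BFS) loop that threads two parallel lists of numbers and digit sums with an explicit-stack depth-first traversal of the digit-extension tree collecting into one list, restored to ascending order by a single final in-place sort.
import Mathlib
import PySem

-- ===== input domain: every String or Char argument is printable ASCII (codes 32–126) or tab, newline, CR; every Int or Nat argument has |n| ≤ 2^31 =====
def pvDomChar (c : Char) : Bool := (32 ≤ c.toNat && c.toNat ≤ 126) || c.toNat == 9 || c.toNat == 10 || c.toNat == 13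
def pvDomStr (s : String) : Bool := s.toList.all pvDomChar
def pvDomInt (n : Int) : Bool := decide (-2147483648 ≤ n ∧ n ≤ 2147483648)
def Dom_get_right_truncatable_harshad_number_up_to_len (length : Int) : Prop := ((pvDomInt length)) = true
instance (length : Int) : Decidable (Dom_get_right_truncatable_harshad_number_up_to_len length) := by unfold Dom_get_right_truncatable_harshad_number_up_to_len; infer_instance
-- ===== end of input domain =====

-- B replaces A's level-by-level while loop over parallel number/digit-sum lists
-- by an explicit-stack depth-first traversal of the digit-extension tree
-- followed by one final sort (objective: alternative decomposition, same exact output).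

-- ===== PORT A =====
-- the body of A's while loop: one pass over the parallel number/digit-sum
-- lists, appending every surviving digit extension to the next level's lists
def pvInnerA (nums sums : List Int) : List Int × List Int :=
  (PySem.List.pyRange 0 (PySem.List.len nums) 1).foldl
    (fun (st : List Int × List Int) i =>
      let num := PySem.List.pyGetD nums i 0
      let num_digits_sum := PySem.List.pyGetD sums i 0
      let num_times_10 := num * 10
      (PySem.List.pyRange 0 10 1).foldl
        (fun (st2 : List Int × List Int) digit =>
          let temp_num := num_times_10 + digit
          let temp_num_digit_sum := num_digits_sum + digit
          if PySem.Int.mod temp_num temp_num_digit_sum == 0 then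
            (st2.1 ++ [temp_num], st2.2 ++ [temp_num_digit_sum])
          else st2) st)
    ([], [])

-- A's while loop: current_length counts up towards length
def pvWhileA (length current_length : Int) (nums sums acc : List Int) : List Int :=
  if current_length < length then
    let r := pvInnerA nums sums
    pvWhileA length (current_length + 1) r.1 r.2 (acc ++ r.1)
  else acc
termination_by (length - current_length).toNat
decreasing_by omega

def get_right_truncatable_harshad_number_up_to_len (length : Int) : List Int :=
  let harshad_numbers_of_current_length := PySem.List.pyRange 1 10 1
  let sum_of_digits_of_current_harshad_numbers := PySem.List.pyRange 1 10 1
  pvWhileA length 1 harshad_numbers_of_current_length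
    sum_of_digits_of_current_harshad_numbers
    ([] ++ harshad_numbers_of_current_length)

-- ===== PORT B =====
-- the children pushed for one popped stack entry (the body of B's inner for loop)
def pvPushB (length num digit_sum current_length : Int) : List (Int × Int × Int) :=
  if current_length < length then
    (PySem.List.pyRange 0 10 1).filterMap (fun digit =>
      if PySem.Int.mod (num * 10 + digit) (digit_sum + digit) == 0 then
        some (num * 10 + digit, digit_sum + digit, current_length + 1)
      else none)
  else []

-- B's while loop; the Lean stack keeps its top at the HEAD (Python pops/pushes
-- at the end), so pushing prepends the children reversed
def pvLoopB (length : Int) (stack : List (Int × Int × Int)) (result : List Int) : List Int :=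
  match stack with
  | [] => result
  | (num, digit_sum, current_length) :: rest =>
    pvLoopB length ((pvPushB length num digit_sum current_length).reverse ++ rest)
      (result ++ [num])
termination_by (stack.map (fun e => 11 ^ ((length - e.2.2).toNat))).sum
decreasing_by
  simp only [List.map_append, List.sum_append, List.map_reverse, List.sum_reverse, List.map_cons,
    List.sum_cons]
  have hpos : 0 < 11 ^ ((length - current_length).toNat) := Nat.pow_pos (by omega : (0:ℕ) < 11)
  by_cases hc : current_length < length
  · have hlen : (pvPushB length num digit_sum current_length).length ≤ 10 := by
      rw [pvPushB, if_pos hc]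
      calc ((PySem.List.pyRange 0 10 1).filterMap _).length
          ≤ (PySem.List.pyRange 0 10 1).length := List.length_filterMap_le _ _
        _ = 10 := by rw [PySem.List.length_pyRange_one]; rfl
    have hmem : ∀ x ∈ (pvPushB length num digit_sum current_length).map
        (fun e => 11 ^ ((length - e.2.2).toNat)),
        x ≤ 11 ^ ((length - (current_length + 1)).toNat) := by
      intro x hx
      rw [List.mem_map] at hx
      obtain ⟨e, he, rfl⟩ := hx
      rw [pvPushB, if_pos hc, List.mem_filterMap] at he
      obtain ⟨d, _, hd⟩ := he
      by_cases hm : PySem.Int.mod (num * 10 + d) (digit_sum + d) == 0 <;> simp [hm] at hd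
      subst hd; exact le_refl _
    have hsum := List.sum_le_card_nsmul _ _ hmem
    rw [List.length_map] at hsum
    have hr : (length - current_length).toNat = (length - (current_length + 1)).toNat + 1 := by
      omega
    have h11 : 11 ^ ((length - current_length).toNat)
        = 11 * 11 ^ ((length - (current_length + 1)).toNat) := by
      rw [hr, pow_succ]; ring
    have hb : ((pvPushB length num digit_sum current_length).map
        (fun e => 11 ^ ((length - e.2.2).toNat))).sum
        ≤ 10 * 11 ^ ((length - (current_length + 1)).toNat) := by
      calc _ ≤ (pvPushB length num digit_sum current_length).length •
            11 ^ ((length - (current_length + 1)).toNat) := hsum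
        _ ≤ 10 * 11 ^ ((length - (current_length + 1)).toNat) := by
            rw [smul_eq_mul]
            exact Nat.mul_le_mul_right _ hlen
    omega
  · rw [pvPushB, if_neg hc]
    simp [hpos]

def get_right_truncatable_harshad_number_up_to_len_alt (length : Int) : List Int :=
  let stack := ((PySem.List.pyRange 9 0 (-1)).map (fun d => (d, d, (1:Int)))).reverse
  PySem.List.sorted (pvLoopB length stack []) (fun x => x) false

-- ===== PRECONDITION & SPEC =====
def Spec_get_right_truncatable_harshad_number_up_to_len (length : Int) (out : List Int) : Prop := out = get_right_truncatable_harshad_number_up_to_len_alt length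
instance (length : Int) (out : List Int) : Decidable (Spec_get_right_truncatable_harshad_number_up_to_len length out) := by unfold Spec_get_right_truncatable_harshad_number_up_to_len; infer_instance

-- ===== CLAIM (what is proved, stated in full; the proofs are below) =====
def Claim_equal_get_right_truncatable_harshad_number_up_to_len : Prop := ∀ (length : Int), Dom_get_right_truncatable_harshad_number_up_to_len length → Spec_get_right_truncatable_harshad_number_up_to_len length (get_right_truncatable_harshad_number_up_to_len length)

-- ===== LEMMAS AND PROOFS =====

-- clean model over (number, digit-sum) pairs: children of a node, one BFS
-- level step, the levels after the current one, all levels, DFS subtree lists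
def pvChildren (p : Int × Int) : List (Int × Int) :=
  (PySem.List.pyRange 0 10 1).filterMap (fun d =>
    if PySem.Int.mod (p.1 * 10 + d) (p.2 + d) == 0 then some (p.1 * 10 + d, p.2 + d)
    else none)

def pvStep (ps : List (Int × Int)) : List (Int × Int) := ps.flatMap pvChildren

def pvRest : Nat → List (Int × Int) → List Int
  | 0, _ => []
  | k + 1, ps => (pvStep ps).map Prod.fst ++ pvRest k (pvStep ps)

def pvDfsM (p : Int × Int) : Nat → List Int
  | 0 => [p.1]
  | k + 1 => p.1 :: (pvChildren p).flatMap (fun q => pvDfsM q k)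

def pvAll : Nat → List (Int × Int) → List Int
  | 0, ps => ps.map Prod.fst
  | k + 1, ps => ps.map Prod.fst ++ pvAll k (pvStep ps)

theorem pvFoldPair (cond : Int → Bool) (f g : Int → Int) :
    ∀ (ds : List Int) (l1 l2 : List Int),
    ds.foldl (fun st2 d => if cond d then (st2.1 ++ [f d], st2.2 ++ [g d]) else st2) (l1, l2)
    = (l1 ++ ds.filterMap (fun d => if cond d then some (f d) else none),
       l2 ++ ds.filterMap (fun d => if cond d then some (g d) else none)) := by
  intro ds
  induction ds with
  | nil => simp
  | cons d ds ih =>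
    intro l1 l2
    by_cases h : cond d <;> simp [h, ih]

theorem pvChildren_fst (p : Int × Int) :
    (pvChildren p).map Prod.fst
      = (PySem.List.pyRange 0 10 1).filterMap (fun d =>
          if PySem.Int.mod (p.1 * 10 + d) (p.2 + d) == 0 then some (p.1 * 10 + d) else none) := by
  simp [pvChildren, List.map_filterMap, apply_ite (Option.map Prod.fst)]

theorem pvChildren_snd (p : Int × Int) :
    (pvChildren p).map Prod.snd
      = (PySem.List.pyRange 0 10 1).filterMap (fun d =>
          if PySem.Int.mod (p.1 * 10 + d) (p.2 + d) == 0 then some (p.2 + d) else none) := by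
  simp [pvChildren, List.map_filterMap, apply_ite (Option.map Prod.snd)]

theorem pvFoldOuter :
    ∀ (zs : List (Int × Int)) (l1 l2 : List Int),
    zs.foldl (fun (st : List Int × List Int) p =>
        (PySem.List.pyRange 0 10 1).foldl
          (fun st2 d =>
            if PySem.Int.mod (p.1 * 10 + d) (p.2 + d) == 0 then
              (st2.1 ++ [p.1 * 10 + d], st2.2 ++ [p.2 + d])
            else st2) st) (l1, l2)
    = (l1 ++ (pvStep zs).map Prod.fst, l2 ++ (pvStep zs).map Prod.snd) := by
  intro zs
  induction zs with
  | nil => simp [pvStep]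
  | cons p zs ih =>
    intro l1 l2
    rw [List.foldl_cons,
        pvFoldPair (fun d => PySem.Int.mod (p.1 * 10 + d) (p.2 + d) == 0)
          (fun d => p.1 * 10 + d) (fun d => p.2 + d), ih]
    simp [pvStep, pvChildren_fst, pvChildren_snd]

theorem pvInnerA_eq (nums sums : List Int) (h : sums.length = nums.length) :
    pvInnerA nums sums =
      ((pvStep (nums.zip sums)).map Prod.fst, (pvStep (nums.zip sums)).map Prod.snd) := by
  unfold pvInnerA
  have hlen : (nums.zip sums).length = nums.length := by simp [h]
  have hb : ∀ (st : List Int × List Int), ∀ i ∈ PySem.List.pyRange 0 (PySem.List.len nums) 1,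
      (fun (st : List Int × List Int) i =>
        (PySem.List.pyRange 0 10 1).foldl
          (fun st2 digit =>
            if PySem.Int.mod (PySem.List.pyGetD nums i 0 * 10 + digit) (PySem.List.pyGetD sums i 0 + digit) == 0 then
              (st2.1 ++ [PySem.List.pyGetD nums i 0 * 10 + digit], st2.2 ++ [PySem.List.pyGetD sums i 0 + digit])
            else st2) st) st i
      = (fun (st : List Int × List Int) i =>
          (PySem.List.pyRange 0 10 1).foldl
            (fun st2 d =>
              if PySem.Int.mod ((PySem.List.pyGetD (nums.zip sums) i (0,0)).1 * 10 + d)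
                  ((PySem.List.pyGetD (nums.zip sums) i (0,0)).2 + d) == 0 then
                (st2.1 ++ [(PySem.List.pyGetD (nums.zip sums) i (0,0)).1 * 10 + d],
                 st2.2 ++ [(PySem.List.pyGetD (nums.zip sums) i (0,0)).2 + d])
              else st2) st) st i := by
    intro st i hi
    rw [PySem.List.mem_pyRange_one] at hi
    simp only [PySem.List.len_eq] at hi
    have h0 : 0 ≤ i := hi.1
    have h1 : i.toNat < nums.length := by omega
    have h2 : i.toNat < sums.length := by omega
    have h3 : (i:Int) < ((nums.zip sums).length:Int) := by rw [hlen]; omega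
    have e1 : PySem.List.pyGetD nums i 0 = (PySem.List.pyGetD (nums.zip sums) i (0,0)).1 := by
      rw [PySem.List.pyGetD_eq_getElem nums 0 h0 (by omega),
          PySem.List.pyGetD_eq_getElem (nums.zip sums) (0,0) h0 (by omega)]
      simp [List.getElem_zip]
    have e2 : PySem.List.pyGetD sums i 0 = (PySem.List.pyGetD (nums.zip sums) i (0,0)).2 := by
      rw [PySem.List.pyGetD_eq_getElem sums 0 h0 (by omega),
          PySem.List.pyGetD_eq_getElem (nums.zip sums) (0,0) h0 (by omega)]
      simp [List.getElem_zip]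
    simp only [e1, e2]
  rw [List.foldl_ext _ _ _ hb]
  simp only [PySem.List.len_eq, ← hlen]
  rw [PySem.List.foldl_pyRange_zero_pyGetD' (nums.zip sums) (0,0)
      (fun (st : List Int × List Int) p =>
        (PySem.List.pyRange 0 10 1).foldl
          (fun st2 d =>
            if PySem.Int.mod (p.1 * 10 + d) (p.2 + d) == 0 then
              (st2.1 ++ [p.1 * 10 + d], st2.2 ++ [p.2 + d])
            else st2) st) ([], [])]
  rw [pvFoldOuter]
  simp

theorem pvWhileA_eq (fuel : Nat) : ∀ (length current_length : Int),
    (length - current_length).toNat = fuel → ∀ (ps : List (Int × Int)) (acc : List Int),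
    pvWhileA length current_length (ps.map Prod.fst) (ps.map Prod.snd) acc
      = acc ++ pvRest fuel ps := by
  induction fuel with
  | zero =>
    intro L cl h ps acc
    rw [pvWhileA]
    simp only [if_neg (by omega : ¬ cl < L)]
    simp [pvRest]
  | succ k ih =>
    intro L cl h ps acc
    rw [pvWhileA]
    simp only [if_pos (by omega : cl < L)]
    have hz : (ps.map Prod.fst).zip (ps.map Prod.snd) = ps := by
      rw [List.zip_map']; simp
    rw [pvInnerA_eq _ _ (by simp), hz]
    rw [ih L (cl + 1) (by omega) (pvStep ps) _]
    simp [pvRest]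

theorem flatMap_cons_perm (f : Int × Int → Int) (g : Int × Int → List Int) :
    ∀ (ps : List (Int × Int)),
    (ps.flatMap (fun p => f p :: g p)).Perm (ps.map f ++ ps.flatMap g) := by
  intro ps
  induction ps with
  | nil => simp
  | cons p ps ih =>
    simp only [List.flatMap_cons, List.map_cons, List.cons_append]
    refine List.Perm.cons (f p) ?_
    refine (List.Perm.append_left (g p) ih).trans ?_
    have h1 : g p ++ (ps.map f ++ ps.flatMap g) = (g p ++ ps.map f) ++ ps.flatMap g := by simp
    have h2 : (ps.map f ++ g p) ++ ps.flatMap g = ps.map f ++ (g p ++ ps.flatMap g) := by simp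
    rw [h1, ← h2]
    exact List.Perm.append_right _ List.perm_append_comm

theorem pvPerm (fuel : Nat) : ∀ (ps : List (Int × Int)),
    (ps.flatMap (fun p => pvDfsM p fuel)).Perm (pvAll fuel ps) := by
  induction fuel with
  | zero =>
    intro ps
    have : ps.flatMap (fun p => pvDfsM p 0) = ps.map Prod.fst := by
      induction ps with
      | nil => rfl
      | cons p ps ihp =>
        simp only [List.flatMap_cons, List.map_cons, pvDfsM] at *
        rw [ihp]; rfl
    rw [this, pvAll]
  | succ k ih =>
    intro ps
    have h1 : ps.flatMap (fun p => pvDfsM p (k+1))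
        = ps.flatMap (fun p => p.1 :: (pvChildren p).flatMap (fun q => pvDfsM q k)) := by
      simp [pvDfsM]
    rw [h1, pvAll]
    refine (flatMap_cons_perm Prod.fst _ ps).trans ?_
    refine List.Perm.append_left _ ?_
    have h2 : (ps.flatMap fun p => (pvChildren p).flatMap fun q => pvDfsM q k)
        = (pvStep ps).flatMap (fun q => pvDfsM q k) := by
      rw [pvStep, List.flatMap_assoc]
    rw [h2]; exact ih _

theorem pvChildren_bounds (p : Int × Int) (q : Int × Int) (hq : q ∈ pvChildren p) :
    10 * p.1 ≤ q.1 ∧ q.1 < 10 * p.1 + 10 := by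
  rw [pvChildren, List.mem_filterMap] at hq
  obtain ⟨d, hd, he⟩ := hq
  rw [PySem.List.mem_pyRange_one] at hd
  by_cases hc : PySem.Int.mod (p.1 * 10 + d) (p.2 + d) == 0 <;> simp [hc] at he
  obtain ⟨h1, h2⟩ := he
  omega

theorem pvChildren_pairwise (p : Int × Int) :
    (pvChildren p).Pairwise (fun a b => a.1 < b.1) := by
  rw [pvChildren, List.pairwise_filterMap]
  refine (PySem.List.pairwise_lt_pyRange_one 0 10).imp ?_
  intro d d' hdd b hb b' hb'
  by_cases hc : PySem.Int.mod (p.1 * 10 + d) (p.2 + d) == 0 <;> simp [hc] at hb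
  by_cases hc' : PySem.Int.mod (p.1 * 10 + d') (p.2 + d') == 0 <;> simp [hc'] at hb'
  subst hb; subst hb'
  simp; omega

theorem pvStep_bounds (lo : Int) (ps : List (Int × Int))
    (hb : ∀ p ∈ ps, lo ≤ p.1 ∧ p.1 < 10 * lo) :
    ∀ q ∈ pvStep ps, 10 * lo ≤ q.1 ∧ q.1 < 10 * (10 * lo) := by
  intro q hq
  rw [pvStep, List.mem_flatMap] at hq
  obtain ⟨p, hp, hqc⟩ := hq
  have h1 := hb p hp
  have h2 := pvChildren_bounds p q hqc
  omega

theorem pvStep_pairwise (ps : List (Int × Int))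
    (hp : ps.Pairwise (fun p q => p.1 < q.1)) :
    (pvStep ps).Pairwise (fun p q => p.1 < q.1) := by
  rw [pvStep, List.pairwise_flatMap]
  refine ⟨fun p _ => pvChildren_pairwise p, ?_⟩
  refine hp.imp ?_
  intro p p' hpp' x hx y hy
  have h1 := pvChildren_bounds p x hx
  have h2 := pvChildren_bounds p' y hy
  omega

theorem pvAll_pairwise (fuel : Nat) : ∀ (lo : Int) (ps : List (Int × Int)), 1 ≤ lo →
    (∀ p ∈ ps, lo ≤ p.1 ∧ p.1 < 10 * lo) →
    ps.Pairwise (fun p q => p.1 < q.1) →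
    (pvAll fuel ps).Pairwise (· < ·) ∧ ∀ x ∈ pvAll fuel ps, lo ≤ x := by
  induction fuel with
  | zero =>
    intro lo ps _ hb hp
    constructor
    · exact hp.map Prod.fst (fun a b h => h)
    · intro x hx
      rw [pvAll, List.mem_map] at hx
      obtain ⟨p, hp', rfl⟩ := hx
      exact (hb p hp').1
  | succ k ih =>
    intro lo ps hlo hb hp
    have hsb := pvStep_bounds lo ps hb
    have hsp := pvStep_pairwise ps hp
    have ihs := ih (10 * lo) (pvStep ps) (by omega) hsb hsp
    rw [pvAll, List.pairwise_append]
    refine ⟨⟨hp.map Prod.fst (fun a b h => h), ihs.1, ?_⟩, ?_⟩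
    · intro a ha b hbmem
      rw [List.mem_map] at ha
      obtain ⟨p, hp', rfl⟩ := ha
      have := (hb p hp').2
      have := ihs.2 b hbmem
      omega
    · intro x hx
      rw [List.mem_append] at hx
      rcases hx with hx | hx
      · rw [List.mem_map] at hx
        obtain ⟨p, hp', rfl⟩ := hx
        exact (hb p hp').1
      · have := ihs.2 x hx; omega

theorem pvAll_rest (k : Nat) : ∀ (ps : List (Int × Int)),
    pvAll k ps = ps.map Prod.fst ++ pvRest k ps := by
  induction k with
  | zero => intro ps; simp [pvAll, pvRest]
  | succ k ih => intro ps; simp [pvAll, pvRest, ih]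

theorem pvLoopB_perm (length : Int) (stack : List (Int × Int × Int)) (result : List Int) :
    (pvLoopB length stack result).Perm
      (result ++ stack.flatMap (fun e => pvDfsM (e.1, e.2.1) ((length - e.2.2).toNat))) := by
  fun_induction pvLoopB length stack result with
  | case1 => simp
  | case2 result num digit_sum current_length rest ih =>
    refine ih.trans ?_
    by_cases hc : current_length < length
    · have hr : (length - current_length).toNat
          = (length - (current_length + 1)).toNat + 1 := by omega
      have hpush : pvPushB length num digit_sum current_length
          = (pvChildren (num, digit_sum)).map
              (fun q => (q.1, q.2, current_length + 1)) := by
        rw [pvPushB, if_pos hc, pvChildren, List.map_filterMap]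
        refine List.filterMap_congr ?_
        intro d _
        by_cases hm : PySem.Int.mod (num * 10 + d) (digit_sum + d) == 0 <;> simp [hm]
      have hsub : ((pvPushB length num digit_sum current_length).flatMap
            (fun e => pvDfsM (e.1, e.2.1) ((length - e.2.2).toNat)))
          = (pvChildren (num, digit_sum)).flatMap
              (fun q => pvDfsM q ((length - (current_length + 1)).toNat)) := by
        rw [hpush, List.flatMap_map]
      rw [List.flatMap_cons, hr, pvDfsM]
      have hrev : (((pvPushB length num digit_sum current_length).reverse ++ rest).flatMap
            (fun e => pvDfsM (e.1, e.2.1) ((length - e.2.2).toNat))).Perm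
          ((pvChildren (num, digit_sum)).flatMap
              (fun q => pvDfsM q ((length - (current_length + 1)).toNat))
            ++ rest.flatMap (fun e => pvDfsM (e.1, e.2.1) ((length - e.2.2).toNat))) := by
        rw [List.flatMap_append, ← hsub]
        exact List.Perm.append_right _
          (List.Perm.flatMap (List.reverse_perm _) (fun a _ => List.Perm.refl _))
      refine ((List.Perm.append_left (result ++ [num]) hrev).trans ?_)
      simp
    · have hr : (length - current_length).toNat = 0 := by omega
      rw [pvPushB, if_neg hc]
      simp [hr, pvDfsM]

theorem pvMain (L : Int) :
    get_right_truncatable_harshad_number_up_to_len L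
      = get_right_truncatable_harshad_number_up_to_len_alt L := by
  set fuel := (L - 1).toNat with hfuel
  set seed : List (Int × Int) := (PySem.List.pyRange 1 10 1).map (fun d => (d, d)) with hseed
  have hfst : seed.map Prod.fst = PySem.List.pyRange 1 10 1 := by
    rw [hseed, List.map_map]; exact List.map_id' _
  have hsnd : seed.map Prod.snd = PySem.List.pyRange 1 10 1 := by
    rw [hseed, List.map_map]; exact List.map_id' _
  have hA : get_right_truncatable_harshad_number_up_to_len L = pvAll fuel seed := by
    rw [get_right_truncatable_harshad_number_up_to_len]
    simp only [List.nil_append]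
    have hw := pvWhileA_eq fuel L 1 (by omega) seed (seed.map Prod.fst)
    rw [hfst, hsnd] at hw
    rw [hw, pvAll_rest, hfst]
  have hstack : ((PySem.List.pyRange 9 0 (-1)).map (fun d => (d, d, (1:Int)))).reverse
      = (PySem.List.pyRange 1 10 1).map (fun d => (d, d, (1:Int))) := by
    rw [PySem.List.pyRange_neg_one_eq_reverse]
    norm_num
  have hB : (pvLoopB L (((PySem.List.pyRange 9 0 (-1)).map (fun d => (d, d, (1:Int)))).reverse)
        []).Perm (seed.flatMap (fun p => pvDfsM p fuel)) := by
    refine (pvLoopB_perm L _ []).trans ?_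
    rw [List.nil_append, hstack, List.flatMap_map, hseed, List.flatMap_map]
  have hbnd : ∀ p ∈ seed, (1:Int) ≤ p.1 ∧ p.1 < 10 * 1 := by
    intro p hp
    rw [hseed, List.mem_map] at hp
    obtain ⟨d, hd, rfl⟩ := hp
    rw [PySem.List.mem_pyRange_one] at hd
    simp; omega
  have hpw : seed.Pairwise (fun p q => p.1 < q.1) :=
    (PySem.List.pairwise_lt_pyRange_one 1 10).map (fun d => (d, d)) (fun a b h => h)
  have hall := pvAll_pairwise fuel 1 seed (by omega) hbnd hpw
  rw [hA, get_right_truncatable_harshad_number_up_to_len_alt]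
  exact (PySem.List.sorted_eq_of_perm_of_pairwise_lt _ _ (fun x => x)
    ((pvPerm fuel seed).symm.trans hB.symm) hall.1).symm

-- ===== VERDICT (by name: the statement is the Claim_ definition above) =====
theorem get_right_truncatable_harshad_number_up_to_len_spec : Claim_equal_get_right_truncatable_harshad_number_up_to_len := by
  intro length _
  unfold Spec_get_right_truncatable_harshad_number_up_to_len
  exact pvMain length
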